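-- pv_equiv track=rewrite | github.com/denzilsaldanha/COMP9021 | superpower.py | arbitrary
-- ===== SOURCE A (Python) =====
-- def arbitrary(hp1):
--     count = 0
--     sum1 = []
--     while (count < len(hp1)):
--         count2 = 0
--         if hp1[count] > 0:
--             count=count+1
--             continue
--         else:
--             cur_sum=0
--             while (count2 < len(hp1)):
--                 sp = list(hp1)
--                 while (count2 < count):
--                     cur_sum = cur_sum + sp[count2]
--                     count2 = count2 + 1
--
--                 count3=count2
--                 while count3<len(hp1):
--                     cur_sum3 = cur_sum
--                     if sp[count3]<0:
--                         cur_sum3=cur_sum3+(sp[count3]*-1)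
--                         count4=count3
--                         cur_sum4=cur_sum3
--                         if sp[count4]<0:
--                             cur_sum4 = cur_sum4 + (sp[count4] * -1)
--                             while count4<len(hp1):
--                                 cur_sum4 = cur_sum4 + sp[count4]
--                                 count4=count4+1
--                             sum1.append(cur_sum4)
--                             count3= count3+1
--
--                     else:
--                         count3 = count3 + 1
--
--                 count2=count2+1
--         count=count+1
--     if not sum1:
--         sum1.append(sum(hp1))
--
--     return max(sum1)
-- ===== SOURCE B (Python) =====
-- def arbitrary(hp1):
--     total = sum(hp1)
--     pref = 0
--     best_prefix = None
--     best = None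
--     for x in hp1:
--         if x <= 0 and (best_prefix is None or pref > best_prefix):
--             best_prefix = pref
--         if x < 0:
--             cand = best_prefix + 2 * (-x) + (total - pref)
--             if best is None or cand > best:
--                 best = cand
--         pref += x
--     return total if best is None else best
-- ===== Notes on version B (the rewrite author's own statement) =====
-- stated objective: faster
-- what changed: Replaced the four nested index loops (which enumerate every pair i<=j with hp1[i]<=0, hp1[j]<0 and re-sum prefixes/suffixes) by a single pass that tracks the running prefix sum, the best qualifying prefix sum so far, and the best candidate, using total-pref as the suffix sum.
import Mathlib
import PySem

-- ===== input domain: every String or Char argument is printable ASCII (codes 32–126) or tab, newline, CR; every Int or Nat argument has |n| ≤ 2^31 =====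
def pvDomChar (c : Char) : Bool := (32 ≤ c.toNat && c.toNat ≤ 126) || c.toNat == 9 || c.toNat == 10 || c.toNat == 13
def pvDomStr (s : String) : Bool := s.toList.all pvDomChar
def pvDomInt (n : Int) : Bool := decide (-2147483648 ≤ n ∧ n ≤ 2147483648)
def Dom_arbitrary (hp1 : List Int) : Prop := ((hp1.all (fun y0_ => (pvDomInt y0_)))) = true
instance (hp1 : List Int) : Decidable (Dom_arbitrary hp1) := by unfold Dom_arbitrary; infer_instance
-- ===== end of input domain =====

-- B replaces A's four nested index loops by a single pass over the list (faster).

-- ===== PORT A =====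
-- every index below is only read under a guard k < length, so getD _ 0 is exact
def pvGet (l : List Int) (k : Nat) : Int := l.getD k 0

-- 'while count4 < len(hp1): cur_sum4 += sp[count4]; count4 += 1'
def aCount4 (sp : List Int) (count4 : Nat) (cur_sum4 : Int) : Int :=
  if count4 < sp.length then aCount4 sp (count4 + 1) (cur_sum4 + pvGet sp count4)
  else cur_sum4
termination_by sp.length - count4

-- 'while count3 < len(hp1): …' (the body appending to sum1)
def aCount3 (sp : List Int) (count3 : Nat) (cur_sum : Int) (sum1 : List Int) : List Int :=
  if count3 < sp.length then
    let cur_sum3 := cur_sum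
    if pvGet sp count3 < 0 then
      let cur_sum3 := cur_sum3 + (pvGet sp count3 * -1)
      let count4 := count3
      let cur_sum4 := cur_sum3
      if pvGet sp count4 < 0 then
        let cur_sum4 := cur_sum4 + (pvGet sp count4 * -1)
        let cur_sum4 := aCount4 sp count4 cur_sum4
        aCount3 sp (count3 + 1) cur_sum (sum1 ++ [cur_sum4])
      else
        -- unreachable: count4 = count3 and sp[count3] < 0 already holds
        -- (Python would loop forever here; never reached)
        aCount3 sp (count3 + 1) cur_sum sum1
    else aCount3 sp (count3 + 1) cur_sum sum1
  else sum1
termination_by sp.length - count3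

-- 'while count2 < count: cur_sum += sp[count2]; count2 += 1'
def aPref (sp : List Int) (count2 count : Nat) (cur_sum : Int) : Nat × Int :=
  if count2 < count then aPref sp (count2 + 1) count (cur_sum + pvGet sp count2)
  else (count2, cur_sum)
termination_by count - count2

theorem aPref_fst_ge (sp : List Int) (count2 count : Nat) (cur_sum : Int) :
    count2 ≤ (aPref sp count2 count cur_sum).1 := by
  fun_induction aPref with
  | case1 _ _ _ ih => omega
  | case2 => simp

-- 'while count2 < len(hp1): …'
def aCount2 (sp : List Int) (count2 count : Nat) (cur_sum : Int) (sum1 : List Int) : List Int :=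
  if h : count2 < sp.length then
    let p := aPref sp count2 count cur_sum
    let sum1' := aCount3 sp p.1 p.2 sum1
    aCount2 sp (p.1 + 1) count p.2 sum1'
  else sum1
termination_by sp.length - count2
decreasing_by have := aPref_fst_ge sp count2 count cur_sum; omega

-- 'while count < len(hp1): …'
def aOuter (hp1 : List Int) (count : Nat) (sum1 : List Int) : List Int :=
  if count < hp1.length then
    if pvGet hp1 count > 0 then aOuter hp1 (count + 1) sum1
    else aOuter hp1 (count + 1) (aCount2 hp1 0 count 0 sum1)
  else sum1
termination_by hp1.length - count

def arbitrary (hp1 : List Int) : Int :=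
  let sum1 := aOuter hp1 0 []
  let sum1 := if sum1 = [] then [hp1.sum] else sum1
  match PySem.List.max? sum1 (fun x => x) with
  | some m => m
  | none => 0  -- unreachable: sum1 is nonempty here

-- ===== PORT B =====
-- state (pref, best_prefix, best); one step of the 'for x in hp1' loop
def altStep (total : Int) (s : Int × Option Int × Option Int) (x : Int) :
    Int × Option Int × Option Int :=
  let pref := s.1
  let bp := if x ≤ 0 ∧ (s.2.1 = none ∨ ∃ b, s.2.1 = some b ∧ b < pref) then some pref else s.2.1
  let best :=
    if x < 0 then
      -- best_prefix is an int whenever x < 0 (the branch above has run), so getD 0 is exact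
      let cand := bp.getD 0 + 2 * (-x) + (total - pref)
      match s.2.2 with
      | none => some cand
      | some b => if b < cand then some cand else some b
    else s.2.2
  (pref + x, bp, best)

def arbitrary_alt (hp1 : List Int) : Int :=
  let total := hp1.sum
  let st := hp1.foldl (altStep total) (0, none, none)
  match st.2.2 with
  | none => total
  | some b => b

-- ===== PRECONDITION & SPEC =====
def Spec_arbitrary (hp1 : List Int) (out : Int) : Prop := out = arbitrary_alt hp1
instance (hp1 : List Int) (out : Int) : Decidable (Spec_arbitrary hp1 out) := by unfold Spec_arbitrary; infer_instance

-- ===== CLAIM (what is proved, stated in full; the proofs are below) =====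
def Claim_equal_arbitrary : Prop := ∀ (hp1 : List Int), Dom_arbitrary hp1 → Spec_arbitrary hp1 (arbitrary hp1)

-- ===== LEMMAS AND PROOFS =====

-- candidate value appended by A for pair (i, j)
def valIJ (hp1 : List Int) (i j : Nat) : Int :=
  (hp1.take i).sum + pvGet hp1 j * -1 + pvGet hp1 j * -1 + (hp1.drop j).sum

-- the pair-candidate list, in canonical order
def cands (hp1 : List Int) : List Int :=
  (List.range hp1.length).flatMap (fun j =>
    if pvGet hp1 j < 0 then
      ((List.range (j + 1)).filter (fun i => decide (pvGet hp1 i ≤ 0))).map (fun i => valIJ hp1 i j)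
    else [])

-- "x is a candidate value of some qualifying pair"
def Qprop (hp1 : List Int) (x : Int) : Prop :=
  ∃ i j, i ≤ j ∧ j < hp1.length ∧ pvGet hp1 i ≤ 0 ∧ pvGet hp1 j < 0 ∧ x = valIJ hp1 i j

-- list produced by one run of the count3 loop
def innerL (hp1 : List Int) (c : Nat) (cur : Int) : List Int :=
  ((List.range' c (hp1.length - c)).filter (fun j => decide (pvGet hp1 j < 0))).map
    (fun j => cur + pvGet hp1 j * -1 + pvGet hp1 j * -1 + (hp1.drop j).sum)

-- list produced by one run of the count2 loop started at 0
def midL (hp1 : List Int) (i : Nat) : List Int :=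
  (List.range' i (hp1.length - i)).flatMap (fun c => innerL hp1 c ((hp1.take i).sum))

-- B-side: prefix sums of qualifying i < k, and per-j best candidates
def Plist (hp1 : List Int) (k : Nat) : List Int :=
  ((List.range k).filter (fun i => decide (pvGet hp1 i ≤ 0))).map (fun i => (hp1.take i).sum)

def bc (hp1 : List Int) (j : Nat) : Int :=
  (PySem.List.max? (Plist hp1 (j + 1)) (fun x => x)).getD 0
    + 2 * (-(pvGet hp1 j)) + (hp1.sum - (hp1.take j).sum)

def Clist (hp1 : List Int) (k : Nat) : List Int :=
  ((List.range k).filter (fun j => decide (pvGet hp1 j < 0))).map (bc hp1)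

theorem drop_sum_succ (l : List Int) (c : Nat) (h : c < l.length) :
    (l.drop c).sum = pvGet l c + (l.drop (c + 1)).sum := by
  conv_lhs => rw [List.drop_eq_getElem_cons h]
  rw [List.sum_cons]
  simp [pvGet, List.getD_eq_getElem?_getD, List.getElem?_eq_getElem h]

theorem aCount4_eq (sp : List Int) (c : Nat) (x : Int) :
    aCount4 sp c x = x + (sp.drop c).sum := by
  fun_induction aCount4 with
  | case1 c x h ih => rw [ih, drop_sum_succ sp c h]; ring
  | case2 c x h =>
    have : sp.length ≤ c := by omega
    simp [List.drop_of_length_le this]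

theorem aCount3_eq (sp : List Int) (c : Nat) (cur : Int) (sum1 : List Int) :
    aCount3 sp c cur sum1 = sum1 ++ innerL sp c cur := by
  fun_induction aCount3 with
  | case1 c sum1 h _ hneg _ _ _ hneg2 _ _ ih =>
    rw [ih]
    show (sum1 ++ [aCount4 sp c (cur + pvGet sp c * -1 + pvGet sp c * -1)])
        ++ innerL sp (c + 1) cur = sum1 ++ innerL sp c cur
    rw [aCount4_eq]
    have hr : sp.length - c = (sp.length - (c + 1)) + 1 := by omega
    simp [innerL, hr, List.range'_succ, hneg]
  | case2 c sum1 h hneg _ hnot ih =>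
    exact absurd hneg hnot
  | case3 c sum1 h hnot ih =>
    rw [ih]
    have hr : sp.length - c = (sp.length - (c + 1)) + 1 := by omega
    simp [innerL, hr, List.range'_succ, hnot]
  | case4 c sum1 h =>
    have : sp.length - c = 0 := by omega
    simp [innerL, this]

theorem aPref_ge (sp : List Int) (c2 count : Nat) (cur : Int) (h : count ≤ c2) :
    aPref sp c2 count cur = (c2, cur) := by
  unfold aPref; rw [if_neg (by omega)]

theorem aPref_le (sp : List Int) (c2 count : Nat) (cur : Int) (h : c2 ≤ count) :
    aPref sp c2 count cur = (count, cur + ((sp.take count).drop c2).sum) := by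
  suffices H : ∀ k c2 cur, c2 ≤ count → count - c2 = k →
      aPref sp c2 count cur = (count, cur + ((sp.take count).drop c2).sum) from
    H _ c2 cur h rfl
  intro k
  induction k with
  | zero =>
    intro c2 cur h hk
    have hc : c2 = count := by omega
    subst hc
    rw [aPref_ge sp _ _ _ le_rfl]
    simp
  | succ k ih =>
    intro c2 cur h hk
    have hlt : c2 < count := by omega
    unfold aPref
    rw [if_pos hlt, ih (c2 + 1) _ (by omega) (by omega)]
    by_cases hc : c2 < sp.length
    · have hlen : c2 < ((sp.take count).length) := by simp; omega
      rw [drop_sum_succ _ _ hlen]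
      have hg : pvGet (sp.take count) c2 = pvGet sp c2 := by
        simp [pvGet, List.getD_eq_getElem?_getD, List.getElem?_eq_getElem hlen,
          List.getElem?_eq_getElem hc, List.getElem_take]
      rw [hg]
      congr 1
      ring
    · have h1 : (sp.take count).length ≤ c2 := by simp; omega
      rw [List.drop_of_length_le h1, List.drop_of_length_le (by omega : (sp.take count).length ≤ c2 + 1)]
      have : pvGet sp c2 = 0 := by
        simp [pvGet, List.getD_eq_getElem?_getD, List.getElem?_eq_none (by omega : sp.length ≤ c2)]
      rw [this]
      simp

theorem aCount2_tail (sp : List Int) (c2 count : Nat) (cur : Int) (sum1 : List Int)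
    (h : count ≤ c2) :
    aCount2 sp c2 count cur sum1
      = sum1 ++ (List.range' c2 (sp.length - c2)).flatMap (fun c => innerL sp c cur) := by
  suffices H : ∀ k c2 cur sum1, count ≤ c2 → sp.length - c2 ≤ k →
      aCount2 sp c2 count cur sum1
        = sum1 ++ (List.range' c2 (sp.length - c2)).flatMap (fun c => innerL sp c cur) from
    H (sp.length - c2) c2 cur sum1 h le_rfl
  intro k
  induction k with
  | zero =>
    intro c2 cur sum1 h hk
    unfold aCount2
    rw [dif_neg (by omega)]
    simp [show sp.length - c2 = 0 by omega]
  | succ k ih =>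
    intro c2 cur sum1 h hk
    by_cases hc : c2 < sp.length
    · unfold aCount2
      rw [dif_pos hc]
      simp only [aPref_ge sp c2 count cur h, aCount3_eq]
      rw [ih (c2 + 1) cur _ (by omega) (by omega)]
      have hr : sp.length - c2 = (sp.length - (c2 + 1)) + 1 := by omega
      rw [hr, List.range'_succ]
      simp
    · unfold aCount2
      rw [dif_neg hc]
      simp [show sp.length - c2 = 0 by omega]

theorem aCount2_zero (sp : List Int) (count : Nat) (sum1 : List Int) (h : count < sp.length) :
    aCount2 sp 0 count 0 sum1 = sum1 ++ midL sp count := by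
  unfold aCount2
  rw [dif_pos (by omega : 0 < sp.length)]
  simp only [aPref_le sp 0 count 0 (Nat.zero_le count), List.drop_zero, zero_add, aCount3_eq]
  rw [aCount2_tail sp (count + 1) count _ _ (by omega)]
  unfold midL
  have hr : sp.length - count = (sp.length - (count + 1)) + 1 := by omega
  rw [hr, List.range'_succ]
  simp

theorem aOuter_eq (hp1 : List Int) (count : Nat) (sum1 : List Int) :
    aOuter hp1 count sum1
      = sum1 ++ (List.range' count (hp1.length - count)).flatMap
          (fun i => if pvGet hp1 i > 0 then [] else midL hp1 i) := by
  fun_induction aOuter with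
  | case1 count sum1 h hpos ih =>
    rw [ih]
    have hr : hp1.length - count = (hp1.length - (count + 1)) + 1 := by omega
    rw [hr, List.range'_succ]
    simp [hpos]
  | case2 count sum1 h hpos ih =>
    rw [aCount2_zero hp1 count sum1 h] at ih ⊢
    rw [ih]
    have hr : hp1.length - count = (hp1.length - (count + 1)) + 1 := by omega
    rw [hr, List.range'_succ]
    simp [hpos]
  | case3 count sum1 h =>
    simp [show hp1.length - count = 0 by omega]

theorem mem_sum1_iff (hp1 : List Int) (x : Int) :
    x ∈ aOuter hp1 0 [] ↔ Qprop hp1 x := by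
  rw [aOuter_eq]
  unfold Qprop valIJ
  simp [midL, innerL, List.mem_flatMap, List.mem_range', List.mem_filter, List.mem_map]
  constructor
  · rintro ⟨a, ha, hga, i, hi, i1, ⟨hi1, hneg⟩, hx⟩
    exact ⟨a, a + i + i1, by omega, by omega, hga, hneg, hx.symm⟩
  · rintro ⟨i, j, hij, hj, hgi, hgj, hx⟩
    refine ⟨i, by omega, hgi, 0, by omega, j - i, ⟨by omega, ?_⟩, ?_⟩
    · have h : i + 0 + (j - i) = j := by omega
      rw [h]; exact hgj
    · have h : i + 0 + (j - i) = j := by omega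
      rw [h]; exact hx.symm

theorem mem_cands_iff (hp1 : List Int) (x : Int) :
    x ∈ cands hp1 ↔ Qprop hp1 x := by
  unfold cands Qprop valIJ
  simp [List.mem_flatMap, List.mem_range, List.mem_filter, List.mem_map]
  constructor
  · rintro ⟨a, ha, hga, a1, ⟨h1, h2⟩, hx⟩
    exact ⟨a1, a, h1, ha, h2, hga, hx.symm⟩
  · rintro ⟨i, j, hij, hj, hgi, hgj, hx⟩
    exact ⟨j, hj, hgj, i, ⟨hij, hgi⟩, hx.symm⟩

theorem pymax_append_one (l : List Int) (a : Int) :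
    PySem.List.max? (l ++ [a]) (fun x => x)
      = some (match PySem.List.max? l (fun x => x) with | none => a | some m => max m a) := by
  cases l with
  | nil => simp [PySem.List.max?]
  | cons x t => simp [PySem.List.max?_id_cons, List.foldl_append]

theorem pymax_congr (l1 l2 : List Int)
    (hne : l1 = [] ↔ l2 = [])
    (h12 : ∀ x ∈ l1, ∃ y ∈ l2, x ≤ y)
    (h21 : ∀ y ∈ l2, ∃ x ∈ l1, y ≤ x) :
    PySem.List.max? l1 (fun x => x) = PySem.List.max? l2 (fun x => x) := by
  by_cases h1 : l1 = []
  · rw [h1, hne.mp h1]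
  · have h2 : l2 ≠ [] := fun h => h1 (hne.mpr h)
    cases hm1 : PySem.List.max? l1 (fun x => x) with
    | none => rw [PySem.List.max?_eq_none_iff] at hm1; exact absurd hm1 h1
    | some m1 =>
      cases hm2 : PySem.List.max? l2 (fun x => x) with
      | none => rw [PySem.List.max?_eq_none_iff] at hm2; exact absurd hm2 h2
      | some m2 =>
        obtain ⟨y, hy, hxy⟩ := h12 m1 (PySem.List.max?_mem hm1)
        have hy2 : y ≤ m2 := PySem.List.max?_isMax hm2 y hy
        obtain ⟨z, hz, hyz⟩ := h21 m2 (PySem.List.max?_mem hm2)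
        have hz1 : z ≤ m1 := PySem.List.max?_isMax hm1 z hz
        have : m1 = m2 := by omega
        rw [this]

theorem Plist_succ (hp1 : List Int) (k : Nat) :
    Plist hp1 (k + 1)
      = Plist hp1 k ++ (if pvGet hp1 k ≤ 0 then [(hp1.take k).sum] else []) := by
  simp only [Plist, List.range_succ, List.filter_append, List.map_append]
  congr 1
  by_cases h : pvGet hp1 k ≤ 0 <;> simp [h]

theorem Clist_succ (hp1 : List Int) (k : Nat) :
    Clist hp1 (k + 1)
      = Clist hp1 k ++ (if pvGet hp1 k < 0 then [bc hp1 k] else []) := by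
  simp only [Clist, List.range_succ, List.filter_append, List.map_append]
  congr 1
  by_cases h : pvGet hp1 k < 0 <;> simp [h]

theorem alt_invariant (hp1 : List Int) (k : Nat) (hk : k ≤ hp1.length) :
    (hp1.take k).foldl (altStep hp1.sum) (0, none, none)
      = ((hp1.take k).sum, PySem.List.max? (Plist hp1 k) (fun x => x),
          PySem.List.max? (Clist hp1 k) (fun x => x)) := by
  induction k with
  | zero => simp [Plist, Clist, PySem.List.max?]
  | succ k ih =>
    have hkn : k < hp1.length := by omega
    have hg : pvGet hp1 k = hp1[k] := by
      simp [pvGet, List.getD_eq_getElem?_getD, List.getElem?_eq_getElem hkn]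
    have ht : hp1.take (k + 1) = hp1.take k ++ [hp1[k]] := by
      rw [List.take_add_one, List.getElem?_eq_getElem hkn]
      simp
    rw [ht, List.foldl_append, ih (by omega), List.foldl_cons, List.foldl_nil]
    simp only [altStep]
    have hbp : (if hp1[k] ≤ 0 ∧ ((PySem.List.max? (Plist hp1 k) fun x => x) = none ∨
          ∃ b, (PySem.List.max? (Plist hp1 k) fun x => x) = some b ∧ b < (List.take k hp1).sum) then
        some (List.take k hp1).sum
      else PySem.List.max? (Plist hp1 k) fun x => x)
        = PySem.List.max? (Plist hp1 (k + 1)) fun x => x := by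
      rw [Plist_succ, hg]
      by_cases hle : hp1[k] ≤ 0
      · rw [if_pos hle, pymax_append_one]
        cases hmp : PySem.List.max? (Plist hp1 k) fun x => x with
        | none => rw [if_pos ⟨hle, Or.inl rfl⟩]
        | some b =>
          by_cases hb : b < (List.take k hp1).sum
          · rw [if_pos ⟨hle, Or.inr ⟨b, rfl, hb⟩⟩]
            simp [max_eq_right (le_of_lt hb)]
          · rw [if_neg]
            · simp [max_eq_left (by omega : (List.take k hp1).sum ≤ b)]
            · rintro ⟨-, h | ⟨b', hb', hlt⟩⟩
              · exact absurd h (Option.some_ne_none b)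
              · injection hb' with hb''
                subst hb''
                exact hb hlt
      · rw [if_neg hle, List.append_nil, if_neg (fun hc => hle hc.1)]
    rw [hbp]
    refine congrArg₂ Prod.mk ?_ (congrArg₂ Prod.mk rfl ?_)
    · rw [List.sum_append, List.sum_cons, List.sum_nil, add_zero]
    have hbc : (PySem.List.max? (Plist hp1 (k + 1)) fun x => x).getD 0 + 2 * -hp1[k]
        + (hp1.sum - (List.take k hp1).sum) = bc hp1 k := by
      unfold bc
      rw [hg]
    rw [Clist_succ, hg]
    by_cases hneg : hp1[k] < 0
    · rw [if_pos hneg, if_pos hneg, pymax_append_one]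
      simp only [hbc]
      cases hmc : PySem.List.max? (Clist hp1 k) fun x => x with
      | none => rfl
      | some b =>
        by_cases hb : b < bc hp1 k
        · simp [hb, max_eq_right (le_of_lt hb)]
        · simp [hb, max_eq_left (by omega : bc hp1 k ≤ b)]
    · rw [if_neg hneg, if_neg hneg, List.append_nil]

theorem mem_Clist (hp1 : List Int) (y : Int) :
    y ∈ Clist hp1 hp1.length ↔ ∃ j, j < hp1.length ∧ pvGet hp1 j < 0 ∧ y = bc hp1 j := by
  simp [Clist, List.mem_map, List.mem_filter, List.mem_range]
  constructor
  · rintro ⟨j, ⟨hj, hgj⟩, hy⟩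
    exact ⟨j, hj, hgj, hy.symm⟩
  · rintro ⟨j, hj, hgj, hy⟩
    exact ⟨j, ⟨hj, hgj⟩, hy.symm⟩

theorem mem_Plist (hp1 : List Int) (i k : Nat) (hik : i < k) (hgi : pvGet hp1 i ≤ 0) :
    (hp1.take i).sum ∈ Plist hp1 k := by
  simp [Plist, List.mem_map, List.mem_filter, List.mem_range]
  exact ⟨i, ⟨hik, hgi⟩, rfl⟩

theorem Plist_max_eq (hp1 : List Int) (j : Nat) (hgj : pvGet hp1 j ≤ 0) :
    ∃ m, PySem.List.max? (Plist hp1 (j + 1)) (fun x => x) = some m ∧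
      (∃ i, i ≤ j ∧ pvGet hp1 i ≤ 0 ∧ m = (hp1.take i).sum) ∧
      (∀ i, i ≤ j → pvGet hp1 i ≤ 0 → (hp1.take i).sum ≤ m) := by
  have hmem : (hp1.take j).sum ∈ Plist hp1 (j + 1) := mem_Plist hp1 j (j + 1) (by omega) hgj
  cases hm : PySem.List.max? (Plist hp1 (j + 1)) (fun x => x) with
  | none =>
    rw [PySem.List.max?_eq_none_iff] at hm
    rw [hm] at hmem
    exact absurd hmem (List.not_mem_nil)
  | some m =>
    refine ⟨m, rfl, ?_, ?_⟩
    · have hmm := PySem.List.max?_mem hm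
      simp [Plist, List.mem_map, List.mem_filter, List.mem_range] at hmm
      obtain ⟨i, ⟨hik, hgi⟩, hmi⟩ := hmm
      exact ⟨i, by omega, hgi, hmi.symm⟩
    · intro i hij hgi
      exact PySem.List.max?_isMax hm _ (mem_Plist hp1 i (j + 1) (by omega) hgi)

theorem bc_eq_val (hp1 : List Int) (j : Nat) (_hj : j < hp1.length) (hgj : pvGet hp1 j < 0) :
    ∃ i, i ≤ j ∧ pvGet hp1 i ≤ 0 ∧ bc hp1 j = valIJ hp1 i j ∧
      (∀ i', i' ≤ j → pvGet hp1 i' ≤ 0 → valIJ hp1 i' j ≤ bc hp1 j) := by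
  obtain ⟨m, hm, ⟨i, hij, hgi, hmi⟩, hmax⟩ := Plist_max_eq hp1 j (le_of_lt hgj)
  have hsplit : (hp1.take j).sum + (hp1.drop j).sum = hp1.sum := by
    rw [← List.sum_append, List.take_append_drop]
  refine ⟨i, hij, hgi, ?_, ?_⟩
  · unfold bc valIJ
    rw [hm]
    simp only [Option.getD_some]
    omega
  · intro i' hi'j hgi'
    have hle := hmax i' hi'j hgi'
    unfold bc valIJ
    rw [hm]
    simp only [Option.getD_some]
    omega

theorem cands_nil_iff (hp1 : List Int) :
    cands hp1 = [] ↔ ¬ ∃ j, j < hp1.length ∧ pvGet hp1 j < 0 := by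
  rw [List.eq_nil_iff_forall_not_mem]
  constructor
  · rintro h ⟨j, hj, hgj⟩
    exact h (valIJ hp1 j j)
      ((mem_cands_iff hp1 _).mpr ⟨j, j, le_rfl, hj, le_of_lt hgj, hgj, rfl⟩)
  · rintro h x hx
    obtain ⟨i, j, hij, hj, hgi, hgj, _⟩ := (mem_cands_iff hp1 x).mp hx
    exact h ⟨j, hj, hgj⟩

theorem Clist_nil_iff (hp1 : List Int) :
    Clist hp1 hp1.length = [] ↔ ¬ ∃ j, j < hp1.length ∧ pvGet hp1 j < 0 := by
  rw [List.eq_nil_iff_forall_not_mem]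
  constructor
  · rintro h ⟨j, hj, hgj⟩
    exact h (bc hp1 j) ((mem_Clist hp1 _).mpr ⟨j, hj, hgj, rfl⟩)
  · rintro h y hy
    obtain ⟨j, hj, hgj, _⟩ := (mem_Clist hp1 y).mp hy
    exact h ⟨j, hj, hgj⟩

theorem cands_max_eq (hp1 : List Int) :
    PySem.List.max? (cands hp1) (fun x => x)
      = PySem.List.max? (Clist hp1 hp1.length) (fun x => x) := by
  apply pymax_congr
  · rw [cands_nil_iff, Clist_nil_iff]
  · intro x hx
    obtain ⟨i, j, hij, hj, hgi, hgj, hxv⟩ := (mem_cands_iff hp1 x).mp hx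
    obtain ⟨i0, _, _, _, hdom⟩ := bc_eq_val hp1 j hj hgj
    exact ⟨bc hp1 j, (mem_Clist hp1 _).mpr ⟨j, hj, hgj, rfl⟩, hxv ▸ hdom i hij hgi⟩
  · intro y hy
    obtain ⟨j, hj, hgj, hyv⟩ := (mem_Clist hp1 y).mp hy
    obtain ⟨i, hij, hgi, heq, _⟩ := bc_eq_val hp1 j hj hgj
    refine ⟨valIJ hp1 i j, (mem_cands_iff hp1 _).mpr ⟨i, j, hij, hj, hgi, hgj, rfl⟩, ?_⟩
    rw [hyv, heq]

-- ===== VERDICT (by name: the statement is the Claim_ definition above) =====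
theorem arbitrary_spec : Claim_equal_arbitrary := by
  intro hp1 _
  unfold Spec_arbitrary arbitrary arbitrary_alt
  have hinv := alt_invariant hp1 hp1.length le_rfl
  rw [List.take_length] at hinv
  simp only [hinv]
  have hmemiff : ∀ x, x ∈ aOuter hp1 0 [] ↔ x ∈ cands hp1 := fun x =>
    (mem_sum1_iff hp1 x).trans (mem_cands_iff hp1 x).symm
  have hnil : (aOuter hp1 0 [] = []) ↔ (cands hp1 = []) := by
    rw [List.eq_nil_iff_forall_not_mem, List.eq_nil_iff_forall_not_mem]
    exact ⟨fun h x hx => h x ((hmemiff x).mpr hx), fun h x hx => h x ((hmemiff x).mp hx)⟩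
  have h1 : PySem.List.max? (aOuter hp1 0 []) (fun x => x)
      = PySem.List.max? (Clist hp1 hp1.length) (fun x => x) := by
    rw [← cands_max_eq]
    exact pymax_congr _ _ hnil
      (fun x hx => ⟨x, (hmemiff x).mp hx, le_rfl⟩)
      (fun y hy => ⟨y, (hmemiff y).mpr hy, le_rfl⟩)
  by_cases hempty : aOuter hp1 0 [] = []
  · have hc : Clist hp1 hp1.length = [] := by
      rw [Clist_nil_iff, ← cands_nil_iff, ← hnil]
      exact hempty
    rw [if_pos hempty, hc]
    simp [PySem.List.max?]
  · rw [if_neg hempty, h1]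
    cases hm : PySem.List.max? (Clist hp1 hp1.length) (fun x => x) with
    | none =>
      rw [PySem.List.max?_eq_none_iff] at hm
      exact absurd (by rw [hnil, cands_nil_iff, ← Clist_nil_iff]; exact hm) hempty
    | some m => rfl
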